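-- pv_equiv track=rewrite | github.com/EverardoMeireles/HydroponicWebServer | pathfinding.py | add_crawler_rotation
-- ===== SOURCE A (Python) =====
-- def add_crawler_rotation(raw_directions):
--     directions_with_rotations = []
--     previous_direction = raw_directions[0]
--     for direction in raw_directions:
--         if direction != previous_direction:
--             directions_with_rotations.append(("rotate-" + direction))
--             directions_with_rotations.append(direction)
--         else:
--             directions_with_rotations.append(direction)
--         previous_direction = direction
--     return directions_with_rotations
-- ===== SOURCE B (Python) =====
-- def add_crawler_rotation(raw_directions):
--     # Run-based: walk runs of equal consecutive directions; emit a rotation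
--     # marker before every run except the first, then the run itself.
--     result = []
--     i, n = 0, len(raw_directions)
--     first = True
--     while i < n:
--         d = raw_directions[i]
--         if not first:
--             result.append("rotate-" + d)
--         while i < n and raw_directions[i] == d:
--             result.append(d)
--             i += 1
--         first = False
--     return result
-- ===== Notes on version B (the rewrite author's own statement) =====
-- stated objective: alternative
-- what changed: B traverses runs of equal consecutive directions (span/groupby style), emitting one rotation marker per run boundary, instead of A's element-wise loop comparing each element with a previous_direction variable.
import Mathlib
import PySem

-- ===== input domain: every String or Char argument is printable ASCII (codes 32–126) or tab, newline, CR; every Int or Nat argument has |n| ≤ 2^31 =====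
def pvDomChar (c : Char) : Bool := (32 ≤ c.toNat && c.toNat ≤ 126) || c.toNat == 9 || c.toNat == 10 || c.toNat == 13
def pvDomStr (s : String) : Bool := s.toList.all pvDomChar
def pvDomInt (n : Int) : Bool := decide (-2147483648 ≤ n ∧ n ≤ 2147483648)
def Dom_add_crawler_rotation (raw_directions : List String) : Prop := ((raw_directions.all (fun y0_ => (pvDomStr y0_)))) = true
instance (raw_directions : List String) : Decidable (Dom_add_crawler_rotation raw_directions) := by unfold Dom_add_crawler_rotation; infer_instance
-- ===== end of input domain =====

-- B replaces A's element-wise previous_direction comparison with a run-based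
-- traversal (consume each maximal run of equal directions, marker per boundary);
-- same cost, different decomposition.


-- ===== PORT A =====
-- A: previous_direction := raw_directions[0]; one pass appending
-- ["rotate-"+d, d] when d differs from the previous element, else [d].
def add_crawler_rotation (raw_directions : List String) : List String :=
  match PySem.List.pyGet? raw_directions 0 with
  | none => []   -- raw_directions[0] raises IndexError; excluded by Pre_
  | some p0 =>
    (raw_directions.foldl
      (fun (st : List String × String) direction =>
        if direction ≠ st.2 then
          (st.1 ++ ["rotate-" ++ direction, direction], direction)
        else
          (st.1 ++ [direction], direction))
      ([], p0)).1

-- ===== PORT B =====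
-- inner while loop of Source B: take the maximal prefix equal to d, return (run, rest)
def pvTakeRun (d : String) : List String → (List String × List String)
  | [] => ([], [])
  | x :: xs =>
    if x = d then
      let p := pvTakeRun d xs
      (x :: p.1, p.2)
    else ([], x :: xs)

-- outer while loop of Source B, made total with a fuel bounded by the list length
-- (the fuel only guarantees termination; it never changes the computed value)
def pvRunsF : Nat → Bool → List String → List String
  | 0, _, _ => []
  | _, _, [] => []
  | fuel + 1, first, d :: rest =>
    let p := pvTakeRun d rest
    (if first then [] else ["rotate-" ++ d]) ++ (d :: p.1) ++ pvRunsF fuel false p.2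

def add_crawler_rotation_alt (raw_directions : List String) : List String :=
  pvRunsF raw_directions.length true raw_directions

-- ===== PRECONDITION & SPEC =====
-- A evaluates raw_directions[0], raising IndexError exactly on the empty list; Pre_ excludes only that input (B returns [] there).
def Pre_add_crawler_rotation (raw_directions : List String) : Prop := raw_directions ≠ []
instance (raw_directions : List String) : Decidable (Pre_add_crawler_rotation raw_directions) := by unfold Pre_add_crawler_rotation; infer_instance
def pvWitness_add_crawler_rotation : List String := ["up", "up", "left"]

def Spec_add_crawler_rotation (raw_directions : List String) (out : List String) : Prop := out = add_crawler_rotation_alt raw_directions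
instance (raw_directions : List String) (out : List String) : Decidable (Spec_add_crawler_rotation raw_directions out) := by unfold Spec_add_crawler_rotation; infer_instance

-- ===== CLAIM (what is proved, stated in full; the proofs are below) =====
def Claim_equal_add_crawler_rotation : Prop := ∀ (raw_directions : List String), Dom_add_crawler_rotation raw_directions → Pre_add_crawler_rotation raw_directions → Spec_add_crawler_rotation raw_directions (add_crawler_rotation raw_directions)

-- ===== LEMMAS AND PROOFS =====

theorem pvTakeRun_snd_len (d : String) (l : List String) :
    (pvTakeRun d l).2.length ≤ l.length := by
  induction l with
  | nil => simp [pvTakeRun]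
  | cons x xs ih =>
    by_cases h : x = d
    · simp [pvTakeRun, h]; omega
    · simp [pvTakeRun, h]

theorem pvTakeRun_spec (d : String) (l : List String) :
    (∀ x ∈ (pvTakeRun d l).1, x = d) ∧
    l = (pvTakeRun d l).1 ++ (pvTakeRun d l).2 ∧
    ((pvTakeRun d l).2 = [] ∨ (pvTakeRun d l).2.head? ≠ some d) := by
  induction l with
  | nil => simp [pvTakeRun]
  | cons x xs ih =>
    by_cases h : x = d
    · simpa [pvTakeRun, h] using ih
    · simp [pvTakeRun, h]

-- reference recursion: A's loop body after the first element, with explicit prev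
def pvGo (prev : String) : List String → List String
  | [] => []
  | d :: rest => (if d ≠ prev then ["rotate-" ++ d, d] else [d]) ++ pvGo d rest

theorem pvFoldA (l : List String) (acc : List String) (prev : String) :
    (l.foldl
      (fun (st : List String × String) direction =>
        if direction ≠ st.2 then
          (st.1 ++ ["rotate-" ++ direction, direction], direction)
        else
          (st.1 ++ [direction], direction))
      (acc, prev)).1 = acc ++ pvGo prev l := by
  induction l generalizing acc prev with
  | nil => simp [pvGo]
  | cons d rest ih =>
    rw [List.foldl_cons]
    by_cases h : d = prev
    · rw [show (if d ≠ (acc, prev).2 then ((acc, prev).1 ++ ["rotate-" ++ d, d], d)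
            else ((acc, prev).1 ++ [d], d)) = (acc ++ [d], d) from by simp [h], ih]
      simp [pvGo, h]
    · rw [show (if d ≠ (acc, prev).2 then ((acc, prev).1 ++ ["rotate-" ++ d, d], d)
            else ((acc, prev).1 ++ [d], d)) = (acc ++ ["rotate-" ++ d, d], d) from by simp [h], ih]
      simp [pvGo, h]

theorem pvGo_run (d : String) (p r : List String) (hp : ∀ x ∈ p, x = d) :
    pvGo d (p ++ r) = p ++ pvGo d r := by
  induction p with
  | nil => simp
  | cons x xs ih =>
    have hx : x = d := hp x (by simp)
    simp only [List.cons_append, pvGo, hx]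
    simp [ih (fun y hy => hp y (by simp [hy]))]

theorem pvGo_eq_runs (fuel : Nat) : ∀ (l : List String) (prev : String),
    l.length ≤ fuel → (l = [] ∨ l.head? ≠ some prev) →
    pvGo prev l = pvRunsF fuel false l := by
  induction fuel with
  | zero =>
    intro l prev hlen _
    cases l with
    | nil => simp [pvGo, pvRunsF]
    | cons d rest => simp at hlen
  | succ fuel ih =>
    intro l prev h hhd
    cases l with
    | nil => simp [pvGo, pvRunsF]
    | cons d rest =>
      have hd : d ≠ prev := by
        rcases hhd with h' | h'
        · simp at h'
        · simpa using h'
      obtain ⟨hall, hsplit, hhead⟩ := pvTakeRun_spec d rest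
      have hlen2 : (pvTakeRun d rest).2.length ≤ fuel :=
        le_trans (pvTakeRun_snd_len d rest) (by simpa using Nat.le_of_succ_le_succ h)
      have h1 : pvGo d rest = (pvTakeRun d rest).1 ++ pvGo d (pvTakeRun d rest).2 := by
        conv_lhs => rw [hsplit]
        exact pvGo_run d _ _ hall
      rw [show pvGo prev (d :: rest) = ("rotate-" ++ d) :: d :: pvGo d rest from by
            simp [pvGo, hd], h1,
          ih _ d hlen2 (by rcases hhead with h' | h' <;> simp [h'])]
      simp [pvRunsF]

-- ===== VERDICT (by name: the statement is the Claim_ definition above) =====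
theorem add_crawler_rotation_spec : Claim_equal_add_crawler_rotation := by
  intro l _ hpre
  unfold Spec_add_crawler_rotation
  cases l with
  | nil => exact absurd rfl hpre
  | cons d rest =>
    obtain ⟨hall, hsplit, hhead⟩ := pvTakeRun_spec d rest
    have hget : PySem.List.pyGet? (d :: rest) 0 = some d := by
      simp [PySem.List.pyGet?, PySem.List.pyIdx?]
    unfold add_crawler_rotation
    rw [hget]
    show (List.foldl _ (([] : List String), d) (d :: rest)).1 = _
    rw [List.foldl_cons,
        show (if d ≠ (([] : List String), d).2
              then ((([] : List String), d).1 ++ ["rotate-" ++ d, d], d)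
              else ((([] : List String), d).1 ++ [d], d)) = (([d] : List String), d) from by simp,
        pvFoldA]
    have h1 : pvGo d rest = (pvTakeRun d rest).1 ++ pvGo d (pvTakeRun d rest).2 := by
      conv_lhs => rw [hsplit]
      exact pvGo_run d _ _ hall
    have h2 : pvGo d (pvTakeRun d rest).2 = pvRunsF rest.length false (pvTakeRun d rest).2 :=
      pvGo_eq_runs rest.length _ d (pvTakeRun_snd_len d rest)
        (by rcases hhead with h' | h' <;> simp [h'])
    rw [h1, h2]
    simp [add_crawler_rotation_alt, pvRunsF]
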